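-- pv_equiv track=rewrite | github.com/JasonLn0711/meta-threads-scam-content-research-2026 | src/data_collection/metadata_extractor.py | normalize_redirects
-- ===== SOURCE A (Python) =====
-- PLATFORM_ORDER = (
--     "line",
--     "whatsapp",
--     "telegram",
--     "messenger",
--     "instagram_dm",
--     "threads_dm",
--     "external_site",
--     "private_group",
--     "phone",
--     "email",
--     "other",
-- )
--
-- def normalize_redirects(values: list[str]) -> list[str]:
--     redirects = [clean_token(value).lower() for value in values if clean_token(value)]
--     if not redirects:
--         return ["none"]
--     allowed = set(PLATFORM_ORDER) | {"none"}
--     cleaned = [value if value in allowed else "other" for value in redirects]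
--     cleaned = [value for value in cleaned if value != "none"]
--     if not cleaned:
--         return ["none"]
--     return sorted(set(cleaned), key=PLATFORM_ORDER.index)
--
-- def clean_token(value: str) -> str:
--     return value.strip().strip(".,;:!?)\"'}")
-- ===== SOURCE B (Python) =====
-- PLATFORM_ORDER = (
--     "line",
--     "whatsapp",
--     "telegram",
--     "messenger",
--     "instagram_dm",
--     "threads_dm",
--     "external_site",
--     "private_group",
--     "phone",
--     "email",
--     "other",
-- )
--
-- def clean_token(value: str) -> str:
--     return value.strip().strip(".,;:!?)\"'}")
--
-- def normalize_redirects(values: list[str]) -> list[str]: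
--     # One pass: clean, lowercase, map unknown tokens to "other", drop "none",
--     # collecting survivors into a set; then scan the canonical order once.
--     present = set()
--     for value in values:
--         token = clean_token(value)
--         if not token:
--             continue
--         token = token.lower()
--         if token == "none":
--             continue
--         present.add(token if token in PLATFORM_ORDER else "other")
--     if not present:
--         return ["none"]
--     return [p for p in PLATFORM_ORDER if p in present]
-- ===== Notes on version B (the rewrite author's own statement) =====
-- stated objective: simpler
-- what changed: Collapses A's three comprehensions plus sorted(set(...), key=PLATFORM_ORDER.index) into one clean/map/drop accumulation pass into a set followed by a single ordered filter over the fixed PLATFORM_ORDER list.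
import Mathlib
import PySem

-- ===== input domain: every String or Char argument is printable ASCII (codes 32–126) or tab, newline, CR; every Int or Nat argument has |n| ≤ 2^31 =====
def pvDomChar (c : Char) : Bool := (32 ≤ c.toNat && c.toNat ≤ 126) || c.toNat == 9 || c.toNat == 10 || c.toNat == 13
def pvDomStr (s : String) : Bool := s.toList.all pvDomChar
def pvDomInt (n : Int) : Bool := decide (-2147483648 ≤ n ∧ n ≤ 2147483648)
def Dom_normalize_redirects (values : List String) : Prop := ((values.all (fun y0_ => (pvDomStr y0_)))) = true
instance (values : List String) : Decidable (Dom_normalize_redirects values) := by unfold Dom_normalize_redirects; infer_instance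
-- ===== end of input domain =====

-- B replaces A's three comprehensions + sorted(set(...), key=PLATFORM_ORDER.index) by one
-- accumulating pass into a set followed by a single ordered filter of PLATFORM_ORDER (simpler).

def PLATFORM_ORDER : List String :=
  ["line", "whatsapp", "telegram", "messenger", "instagram_dm", "threads_dm",
   "external_site", "private_group", "phone", "email", "other"]

def clean_token (value : String) : String :=
  PySem.Str.stripChars (PySem.Str.strip value) ".,;:!?)\"'}"

-- ===== PORT A =====
def normalize_redirects (values : List String) : List String :=
  let redirects :=
    (values.filter (fun value => clean_token value ≠ "")).map
      (fun value => PySem.Str.lower (clean_token value))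
  if redirects = [] then ["none"]
  else
    let allowed := PySem.Set.add (PySem.Set.ofList PLATFORM_ORDER) "none"
    let cleaned := redirects.map (fun value => if PySem.Set.contains allowed value then value else "other")
    let cleaned2 := cleaned.filter (fun value => value ≠ "none")
    if cleaned2 = [] then ["none"]
    else
      -- key = PLATFORM_ORDER.index; every sorted element is in PLATFORM_ORDER, so .index never raises
      PySem.List.sorted (PySem.Set.ofList cleaned2)
        (fun v => (PySem.List.index? PLATFORM_ORDER v).getD 0) false

-- ===== PORT B =====
def normalize_redirects_alt (values : List String) : List String :=
  let present := values.foldl (fun acc value =>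
    let token := clean_token value
    if token = "" then acc
    else
      let token := PySem.Str.lower token
      if token = "none" then acc
      else PySem.Set.add acc (if token ∈ PLATFORM_ORDER then token else "other"))
    PySem.Set.empty
  if present = [] then ["none"]
  else PLATFORM_ORDER.filter (fun p => PySem.Set.contains present p)

-- ===== PRECONDITION & SPEC =====
def Spec_normalize_redirects (values : List String) (out : List String) : Prop := out = normalize_redirects_alt values
instance (values : List String) (out : List String) : Decidable (Spec_normalize_redirects values out) := by unfold Spec_normalize_redirects; infer_instance

-- ===== CLAIM (what is proved, stated in full; the proofs are below) =====
def Claim_equal_normalize_redirects : Prop := ∀ (values : List String), Dom_normalize_redirects values → Spec_normalize_redirects values (normalize_redirects values)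

-- ===== LEMMAS AND PROOFS =====

-- A's middle pipeline: clean+lower, map unknown to "other", drop "none"
def pvPipe (values : List String) : List String :=
  (((values.filter (fun value => clean_token value ≠ "")).map
      (fun value => PySem.Str.lower (clean_token value))).map
    (fun value => if PySem.Set.contains (PySem.Set.add (PySem.Set.ofList PLATFORM_ORDER) "none") value then value else "other")).filter
    (fun value => value ≠ "none")

theorem pvMem_allowed (u : String) :
    PySem.Set.contains (PySem.Set.add (PySem.Set.ofList PLATFORM_ORDER) "none") u = true ↔
      (u ∈ PLATFORM_ORDER ∨ u = "none") := by
  rw [PySem.Set.contains_iff]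
  simp [PySem.Set.mem_add, PySem.Set.mem_ofList]

theorem pvPipe_cons_skip (v : String) (vs : List String) (h0 : clean_token v = "") :
    pvPipe (v :: vs) = pvPipe vs := by
  simp [pvPipe, h0]

theorem pvPipe_cons_none (v : String) (vs : List String) (h0 : ¬ clean_token v = "")
    (h1 : PySem.Str.lower (clean_token v) = "none") :
    pvPipe (v :: vs) = pvPipe vs := by
  simp [pvPipe, h0, h1]

theorem pvPipe_cons_mem (v : String) (vs : List String) (h0 : ¬ clean_token v = "")
    (h1 : ¬ PySem.Str.lower (clean_token v) = "none")
    (h2 : PySem.Str.lower (clean_token v) ∈ PLATFORM_ORDER) :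
    pvPipe (v :: vs) = PySem.Str.lower (clean_token v) :: pvPipe vs := by
  simp [pvPipe, h0, h1, h2]

theorem pvPipe_cons_other (v : String) (vs : List String) (h0 : ¬ clean_token v = "")
    (h1 : ¬ PySem.Str.lower (clean_token v) = "none")
    (h2 : PySem.Str.lower (clean_token v) ∉ PLATFORM_ORDER) :
    pvPipe (v :: vs) = "other" :: pvPipe vs := by
  simp [pvPipe, h0, h1, h2]

theorem pvFold_eq_update (values : List String) (acc : List String) :
    values.foldl (fun acc value =>
      let token := clean_token value
      if token = "" then acc
      else
        let token := PySem.Str.lower token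
        if token = "none" then acc
        else PySem.Set.add acc (if token ∈ PLATFORM_ORDER then token else "other")) acc
    = PySem.Set.update acc (pvPipe values) := by
  induction values generalizing acc with
  | nil => simp [pvPipe, PySem.Set.update]
  | cons v vs ih =>
    simp only [List.foldl_cons]
    by_cases h0 : clean_token v = ""
    · rw [pvPipe_cons_skip v vs h0]
      show List.foldl _ (if clean_token v = "" then acc else _) vs = _
      rw [if_pos h0, ih]
    · by_cases h1 : PySem.Str.lower (clean_token v) = "none"
      · rw [pvPipe_cons_none v vs h0 h1]
        show List.foldl _ (if clean_token v = "" then acc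
          else if PySem.Str.lower (clean_token v) = "none" then acc else _) vs = _
        rw [if_neg h0, if_pos h1, ih]
      · by_cases h2 : PySem.Str.lower (clean_token v) ∈ PLATFORM_ORDER
        · rw [pvPipe_cons_mem v vs h0 h1 h2]
          show List.foldl _ (if clean_token v = "" then acc
            else if PySem.Str.lower (clean_token v) = "none" then acc
            else PySem.Set.add acc (if PySem.Str.lower (clean_token v) ∈ PLATFORM_ORDER
              then PySem.Str.lower (clean_token v) else "other")) vs = _
          rw [if_neg h0, if_neg h1, if_pos h2, ih]
          rfl
        · rw [pvPipe_cons_other v vs h0 h1 h2]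
          show List.foldl _ (if clean_token v = "" then acc
            else if PySem.Str.lower (clean_token v) = "none" then acc
            else PySem.Set.add acc (if PySem.Str.lower (clean_token v) ∈ PLATFORM_ORDER
              then PySem.Str.lower (clean_token v) else "other")) vs = _
          rw [if_neg h0, if_neg h1, if_neg h2, ih]
          rfl

theorem pvKey_pairwise :
    PLATFORM_ORDER.Pairwise
      (fun a b => (PySem.List.index? PLATFORM_ORDER a).getD 0 < (PySem.List.index? PLATFORM_ORDER b).getD 0) := by
  decide

theorem pvPipe_mem (values : List String) (x : String) (hx : x ∈ pvPipe values) :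
    x ∈ PLATFORM_ORDER := by
  simp only [pvPipe, List.mem_filter, List.mem_map] at hx
  obtain ⟨⟨u, _, hu⟩, hne⟩ := hx
  by_cases hc : PySem.Set.contains (PySem.Set.add (PySem.Set.ofList PLATFORM_ORDER) "none") u = true
  · rw [if_pos hc] at hu
    rcases (pvMem_allowed u).mp hc with h1 | h1
    · exact hu ▸ h1
    · exact absurd (hu ▸ h1) (by simpa using hne)
  · rw [if_neg hc] at hu
    rw [← hu]; decide

theorem pvSorted_eq_filter (l : List String) (hl : ∀ x ∈ l, x ∈ PLATFORM_ORDER) :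
    PySem.List.sorted (PySem.Set.ofList l)
        (fun v => (PySem.List.index? PLATFORM_ORDER v).getD 0) false
    = PLATFORM_ORDER.filter (fun p => PySem.Set.contains (PySem.Set.ofList l) p) := by
  apply PySem.List.sorted_eq_of_perm_of_pairwise_lt
  · rw [List.perm_ext_iff_of_nodup
      ((by decide : PLATFORM_ORDER.Nodup).filter _) (PySem.Set.nodup_ofList l)]
    intro a
    simp only [List.mem_filter, PySem.Set.mem_ofList, PySem.Set.contains_iff,
      PySem.Set.mem_ofList]
    constructor
    · rintro ⟨_, h⟩; exact h
    · intro h; exact ⟨hl a h, h⟩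
  · exact List.Pairwise.sublist (List.filter_sublist) pvKey_pairwise

theorem pvOfList_ne_nil (l : List String) (h : l ≠ []) : PySem.Set.ofList l ≠ [] := by
  obtain ⟨x, hx⟩ := List.exists_mem_of_ne_nil l h
  intro hc
  have : x ∈ PySem.Set.ofList l := (PySem.Set.mem_ofList _ _).mpr hx
  simp [hc] at this

theorem pvA_eq (values : List String) :
    normalize_redirects values =
      if pvPipe values = [] then ["none"]
      else PySem.List.sorted (PySem.Set.ofList (pvPipe values))
        (fun v => (PySem.List.index? PLATFORM_ORDER v).getD 0) false := by
  show (if (values.filter (fun value => clean_token value ≠ "")).map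
      (fun value => PySem.Str.lower (clean_token value)) = [] then ["none"]
    else if pvPipe values = [] then ["none"]
    else PySem.List.sorted (PySem.Set.ofList (pvPipe values))
      (fun v => (PySem.List.index? PLATFORM_ORDER v).getD 0) false) = _
  by_cases hr : (values.filter (fun value => clean_token value ≠ "")).map
      (fun value => PySem.Str.lower (clean_token value)) = []
  · rw [if_pos hr]
    have hp : pvPipe values = [] := by rw [pvPipe, hr]; rfl
    rw [if_pos hp]
  · rw [if_neg hr]

theorem pvB_eq (values : List String) :
    normalize_redirects_alt values =
      if PySem.Set.ofList (pvPipe values) = [] then ["none"]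
      else PLATFORM_ORDER.filter (fun p => PySem.Set.contains (PySem.Set.ofList (pvPipe values)) p) := by
  show (if (values.foldl (fun acc value =>
      let token := clean_token value
      if token = "" then acc
      else
        let token := PySem.Str.lower token
        if token = "none" then acc
        else PySem.Set.add acc (if token ∈ PLATFORM_ORDER then token else "other")) PySem.Set.empty) = []
    then ["none"]
    else PLATFORM_ORDER.filter (fun p => PySem.Set.contains (values.foldl (fun acc value =>
      let token := clean_token value
      if token = "" then acc
      else
        let token := PySem.Str.lower token
        if token = "none" then acc
        else PySem.Set.add acc (if token ∈ PLATFORM_ORDER then token else "other")) PySem.Set.empty) p)) = _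
  rw [pvFold_eq_update values PySem.Set.empty]
  rfl

-- ===== VERDICT (by name: the statement is the Claim_ definition above) =====
theorem normalize_redirects_spec : Claim_equal_normalize_redirects := by
  intro values _
  unfold Spec_normalize_redirects
  rw [pvA_eq, pvB_eq]
  by_cases hp : pvPipe values = []
  · rw [if_pos hp, if_pos (by rw [hp]; rfl)]
  · rw [if_neg hp, if_neg (pvOfList_ne_nil _ hp)]
    exact pvSorted_eq_filter _ (pvPipe_mem values)
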